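-- pv_equiv track=rewrite | github.com/gaberani/AlgorithmStudy | 0510/오픈채팅방_김현성.py | solution
-- ===== SOURCE A (Python) =====
-- def solution(record):
--     answer = []
--     user_name = dict()
--     chat = []
--     for r in record:
--         info = r.split()        # cmd, id, name
--         if info[0] == 'Enter':
--             user_name[info[1]] = info[2]
--             chat.append(["{0}님이 들어왔습니다.", info[1]])
--         elif info[0] == 'Leave':
--             chat.append(["{0}님이 나갔습니다.", info[1]])
--         elif info[0] == 'Change':
--             user_name[info[1]] = info[2]
--     for c in chat:
--         answer.append(c[0].format(user_name[c[1]]))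
--     return answer
-- ===== SOURCE B (Python) =====
-- def solution(record):
--     # Dictionary-free alternative: each message resolves its user's final name
--     # by scanning the records backwards for that user's last Enter/Change.
--     events = [r.split() for r in record]
--
--     def final_name(uid):
--         for e in reversed(events):
--             if e[0] in ('Enter', 'Change') and e[1] == uid:
--                 return e[2]
--         return ''
--
--     answer = []
--     for e in events:
--         if e[0] == 'Enter':
--             answer.append(final_name(e[1]) + '님이 들어왔습니다.')
--         elif e[0] == 'Leave':
--             answer.append(final_name(e[1]) + '님이 나갔습니다.')
--     return answer
-- ===== Notes on version B (the rewrite author's own statement) =====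
-- stated objective: alternative
-- what changed: B drops A's name dictionary and intermediate chat list entirely: each Enter/Leave message resolves the user's final name on the spot by a backward scan of the records for that user's last Enter/Change.
import Mathlib
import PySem

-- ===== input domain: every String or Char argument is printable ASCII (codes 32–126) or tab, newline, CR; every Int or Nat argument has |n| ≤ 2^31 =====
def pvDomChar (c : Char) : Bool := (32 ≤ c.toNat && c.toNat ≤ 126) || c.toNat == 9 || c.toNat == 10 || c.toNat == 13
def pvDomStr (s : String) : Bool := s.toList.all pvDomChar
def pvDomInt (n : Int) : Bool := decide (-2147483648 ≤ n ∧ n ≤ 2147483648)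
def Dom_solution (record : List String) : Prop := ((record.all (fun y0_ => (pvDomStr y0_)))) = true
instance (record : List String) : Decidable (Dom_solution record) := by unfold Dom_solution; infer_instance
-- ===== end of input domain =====

-- B replaces A's name dictionary + intermediate chat list by a per-message backward scan
-- for the user's last Enter/Change (objective: alternative, dictionary-free; not faster).

-- ===== PORT A =====
-- c[0].format(name): exact for format strings beginning with "{0}" and containing no other
-- replacement fields — the only two templates A ever stores in chat.
def pyFormatA (tmpl name : String) : String := name ++ String.ofList (tmpl.toList.drop 3)

def solution (record : List String) : List String :=
  -- first loop: builds (user_name, chat); out-of-range info[i] and missing dict keys raise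
  -- in Python and are excluded by Pre_solution; the port uses the "" default there.
  let st := record.foldl (fun (acc : PySem.Dict String String × List (String × String)) r =>
      let info := PySem.Str.split₀ r
      if PySem.List.pyGetD info 0 "" == "Enter" then
        (acc.1.insert (PySem.List.pyGetD info 1 "") (PySem.List.pyGetD info 2 ""),
         acc.2 ++ [("{0}님이 들어왔습니다.", PySem.List.pyGetD info 1 "")])
      else if PySem.List.pyGetD info 0 "" == "Leave" then
        (acc.1, acc.2 ++ [("{0}님이 나갔습니다.", PySem.List.pyGetD info 1 "")])
      else if PySem.List.pyGetD info 0 "" == "Change" then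
        (acc.1.insert (PySem.List.pyGetD info 1 "") (PySem.List.pyGetD info 2 ""), acc.2)
      else acc)
    (PySem.Dict.empty, [])
  -- second loop
  st.2.foldl (fun answer c => answer ++ [pyFormatA c.1 ((st.1.get? c.2).getD "")]) []

-- ===== PORT B =====
-- final_name(uid): first match in reversed(events) of an Enter/Change for uid; '' if none.
def finalName (events : List (List String)) (uid : String) : String :=
  match events.reverse.find? (fun e =>
      (PySem.List.pyGetD e 0 "" == "Enter" || PySem.List.pyGetD e 0 "" == "Change")
      && PySem.List.pyGetD e 1 "" == uid) with
  | some e => PySem.List.pyGetD e 2 ""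
  | none => ""

-- the body of B's output loop (one Python loop iteration)
def stepB (all : List (List String)) (answer : List String) (e : List String) : List String :=
  if PySem.List.pyGetD e 0 "" == "Enter" then
    answer ++ [finalName all (PySem.List.pyGetD e 1 "") ++ "님이 들어왔습니다."]
  else if PySem.List.pyGetD e 0 "" == "Leave" then
    answer ++ [finalName all (PySem.List.pyGetD e 1 "") ++ "님이 나갔습니다."]
  else answer

def solution_alt (record : List String) : List String :=
  let events := record.map (fun r => PySem.Str.split₀ r)
  events.foldl (stepB events) []

-- ===== PRECONDITION & SPEC =====
-- Pre_ excludes exactly the inputs where Python A raises: an empty/short split (IndexError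
-- on info[0]/info[1]/info[2]) or a Leave whose id is never assigned a name (KeyError).
def Pre_solution (record : List String) : Prop :=
  ∀ r ∈ record,
    (PySem.Str.split₀ r) ≠ [] ∧
    (((PySem.Str.split₀ r).headD "" = "Enter" ∨ (PySem.Str.split₀ r).headD "" = "Change") →
       3 ≤ (PySem.Str.split₀ r).length) ∧
    ((PySem.Str.split₀ r).headD "" = "Leave" →
       2 ≤ (PySem.Str.split₀ r).length ∧
       ∃ r' ∈ record,
         ((PySem.Str.split₀ r').headD "" = "Enter" ∨ (PySem.Str.split₀ r').headD "" = "Change") ∧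
         (PySem.Str.split₀ r').getD 1 "" = (PySem.Str.split₀ r).getD 1 "")

instance (record : List String) : Decidable (Pre_solution record) := by
  unfold Pre_solution; infer_instance

def pvWitness_solution : List String :=
  ["Enter u1 Prodo", "Leave u1", "Enter u2 Ryan", "Change u1 Muzi"]

def Spec_solution (record : List String) (out : List String) : Prop := out = solution_alt record
instance (record : List String) (out : List String) : Decidable (Spec_solution record out) := by
  unfold Spec_solution; infer_instance

-- ===== CLAIM (what is proved, stated in full; the proofs are below) =====
def Claim_equal_solution : Prop :=
  ∀ (record : List String), Dom_solution record → Pre_solution record →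
    Spec_solution record (solution record)

-- ===== LEMMAS AND PROOFS =====

-- the loop body conditions, abbreviated for the proofs
def isAssign (e : List String) : Bool :=
  PySem.List.pyGetD e 0 "" == "Enter" || PySem.List.pyGetD e 0 "" == "Change"

def stepA (acc : PySem.Dict String String × List (String × String)) (e : List String) :
    PySem.Dict String String × List (String × String) :=
  if PySem.List.pyGetD e 0 "" == "Enter" then
    (acc.1.insert (PySem.List.pyGetD e 1 "") (PySem.List.pyGetD e 2 ""),
     acc.2 ++ [("{0}님이 들어왔습니다.", PySem.List.pyGetD e 1 "")])
  else if PySem.List.pyGetD e 0 "" == "Leave" then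
    (acc.1, acc.2 ++ [("{0}님이 나갔습니다.", PySem.List.pyGetD e 1 "")])
  else if PySem.List.pyGetD e 0 "" == "Change" then
    (acc.1.insert (PySem.List.pyGetD e 1 "") (PySem.List.pyGetD e 2 ""), acc.2)
  else acc

def chatOf (e : List String) : List (String × String) :=
  if PySem.List.pyGetD e 0 "" == "Enter" then
    [("{0}님이 들어왔습니다.", PySem.List.pyGetD e 1 "")]
  else if PySem.List.pyGetD e 0 "" == "Leave" then
    [("{0}님이 나갔습니다.", PySem.List.pyGetD e 1 "")]
  else []

lemma solution_eq_stepA (record : List String) :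
    solution record =
      (let st := (record.map (fun r => PySem.Str.split₀ r)).foldl stepA (PySem.Dict.empty, []);
       st.2.foldl (fun answer c => answer ++ [pyFormatA c.1 ((st.1.get? c.2).getD "")]) []) := by
  simp only [solution, stepA, List.foldl_map]

-- the dict component of A's fold: last assignment wins = first match in the reversed list
lemma dictA_get (events : List (List String)) (d : PySem.Dict String String)
    (c : List (String × String)) (uid : String) :
    ((events.foldl stepA (d, c)).1).get? uid =
      match events.reverse.find? (fun e => isAssign e && PySem.List.pyGetD e 1 "" == uid) with
      | some e => some (PySem.List.pyGetD e 2 "")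
      | none => d.get? uid := by
  induction events generalizing d c with
  | nil => simp
  | cons e es ih =>
    rw [List.foldl_cons, ih (stepA (d, c) e).1 (stepA (d, c) e).2, List.reverse_cons,
      List.find?_append]
    cases hfind : es.reverse.find? (fun e => isAssign e && PySem.List.pyGetD e 1 "" == uid) with
    | some a => rfl
    | none =>
      simp only [Option.none_or]
      show (stepA (d, c) e).1.get? uid = _
      by_cases ha : (isAssign e && PySem.List.pyGetD e 1 "" == uid) = true
      · have hm : isAssign e = true ∧ PySem.List.pyGetD e 1 "" = uid := by
          simpa [Bool.and_eq_true] using ha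
        simp only [List.find?_cons, ha]
        simp only [stepA, isAssign, Bool.or_eq_true, beq_iff_eq] at hm ⊢
        rcases hm.1 with h0 | h0
        · simp [h0, hm.2]
        · by_cases h1 : PySem.List.pyGetD e 0 "" = "Leave"
          · rw [h1] at h0; simp at h0
          · simp [h0, hm.2]
      · simp only [Bool.not_eq_true] at ha
        simp only [List.find?_cons, ha, List.find?_nil]
        simp only [stepA, beq_iff_eq]
        by_cases h0 : PySem.List.pyGetD e 0 "" = "Enter"
        · have hne : uid ≠ PySem.List.pyGetD e 1 "" := by
            intro h; rw [isAssign] at ha; simp [h0, h] at ha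
          simp [h0, PySem.Dict.get?_insert, hne]
        · by_cases h1 : PySem.List.pyGetD e 0 "" = "Leave"
          · simp [h1]
          · by_cases h2 : PySem.List.pyGetD e 0 "" = "Change"
            · have hne : uid ≠ PySem.List.pyGetD e 1 "" := by
                intro h; rw [isAssign] at ha; simp [h2, h] at ha
              simp [h2, PySem.Dict.get?_insert, hne]
            · simp [h0, h1, h2]

-- the chat component of A's fold
lemma chatA (events : List (List String)) (d : PySem.Dict String String)
    (c : List (String × String)) :
    (events.foldl stepA (d, c)).2 = c ++ events.flatMap chatOf := by
  induction events generalizing d c with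
  | nil => simp
  | cons e es ih =>
    rw [List.foldl_cons, ih]
    simp only [stepA, chatOf, List.flatMap_cons]
    by_cases h0 : PySem.List.pyGetD e 0 "" == "Enter"
    · simp [h0]
    · by_cases h1 : PySem.List.pyGetD e 0 "" == "Leave"
      · simp [h0, h1]
      · by_cases h2 : PySem.List.pyGetD e 0 "" == "Change" <;> simp [h0, h1, h2]

-- the dict lookup A performs for a chat entry equals B's finalName
lemma lookup_eq_finalName (events : List (List String)) (uid : String) :
    (((events.foldl stepA (PySem.Dict.empty, [])).1).get? uid).getD "" =
      finalName events uid := by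
  rw [dictA_get]
  unfold finalName
  have hp : (fun e => (PySem.List.pyGetD e 0 "" == "Enter" || PySem.List.pyGetD e 0 "" == "Change")
        && PySem.List.pyGetD e 1 "" == uid) =
      (fun e => isAssign e && PySem.List.pyGetD e 1 "" == uid) := by
    funext e; rw [isAssign]
  rw [hp]
  cases hfind : events.reverse.find? (fun e => isAssign e && PySem.List.pyGetD e 1 "" == uid) with
  | some a => rfl
  | none => rfl

lemma fmtEnter (n : String) : pyFormatA "{0}님이 들어왔습니다." n = n ++ "님이 들어왔습니다." := rfl
lemma fmtLeave (n : String) : pyFormatA "{0}님이 나갔습니다." n = n ++ "님이 나갔습니다." := rfl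

-- B's fold produces the flatMap of per-event messages
lemma altB (events : List (List String)) (all : List (List String)) (acc : List String) :
    (events.foldl (stepB all) acc) =
      acc ++ events.flatMap (fun e =>
        (chatOf e).map (fun c => pyFormatA c.1 (finalName all c.2))) := by
  induction events generalizing acc with
  | nil => simp
  | cons e es ih =>
    rw [List.foldl_cons, ih]
    simp only [chatOf, stepB, List.flatMap_cons]
    by_cases h0 : PySem.List.pyGetD e 0 "" == "Enter"
    · simp only [h0, if_true]
      simp only [List.map_cons, List.map_nil]
      simp only [fmtEnter]
      simp only [List.append_assoc, List.cons_append, List.nil_append]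
    · by_cases h1 : PySem.List.pyGetD e 0 "" == "Leave"
      · simp only [h0, h1, Bool.false_eq_true, if_false, if_true]
        simp only [List.map_cons, List.map_nil]
        simp only [fmtLeave]
        simp only [List.append_assoc, List.cons_append, List.nil_append]
      · by_cases h2 : PySem.List.pyGetD e 0 "" == "Change" <;> simp [h0, h1]

-- ===== VERDICT (by name: the statement is the Claim_ definition above) =====
theorem solution_spec : Claim_equal_solution := by
  intro record _ _
  unfold Spec_solution
  rw [solution_eq_stepA]
  simp only [solution_alt]
  rw [altB, chatA, List.nil_append, List.nil_append,
    PySem.List.foldl_append_singleton_eq_map, List.map_flatMap]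
  simp only [lookup_eq_finalName, List.nil_append]
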